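-- pv_equiv track=rewrite | github.com/wihn2021/TooXcel | toolxcel/api.py | cell_to_coords
-- ===== SOURCE A (Python) =====
-- def cell_to_coords(cell):
--     col, row = '', ''
--     for char in cell:
--         if char.isdigit():
--             row += char
--         else:
--             col += char
--     col = sum((ord(char.lower()) - ord('a') + 1) * (26 ** i) for i, char in enumerate(reversed(col)))
--     return (col, int(row))
-- ===== SOURCE B (Python) =====
-- def cell_to_coords(cell):
--     def horner(s):
--         if not s:
--             return 0
--         return horner(s[:-1]) * 26 + (ord(s[-1].lower()) - ord('a') + 1)
--     row = ''.join(c for c in cell if c.isdigit())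
--     letters = ''.join(c for c in cell if not c.isdigit())
--     return (horner(letters), int(row))
-- ===== Notes on version B (the rewrite author's own statement) =====
-- stated objective: alternative
-- what changed: Replaces A's single classification loop with pair state plus a reversed-enumerate 26**i power sum by two independent filter comprehensions and a recursive Horner evaluation of the letter string from its last character.
import Mathlib
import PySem

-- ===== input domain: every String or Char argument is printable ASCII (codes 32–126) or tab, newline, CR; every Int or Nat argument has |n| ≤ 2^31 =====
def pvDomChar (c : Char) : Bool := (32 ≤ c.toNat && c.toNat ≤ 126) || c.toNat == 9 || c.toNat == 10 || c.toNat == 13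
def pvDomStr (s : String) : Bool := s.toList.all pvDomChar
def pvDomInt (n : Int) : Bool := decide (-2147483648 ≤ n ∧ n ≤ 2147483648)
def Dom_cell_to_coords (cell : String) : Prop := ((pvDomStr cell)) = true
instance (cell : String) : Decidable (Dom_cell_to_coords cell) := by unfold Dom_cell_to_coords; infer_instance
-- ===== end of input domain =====

-- B replaces A's classification loop with pair state and reversed-enumerate power sum by two
-- filter comprehensions and a recursive Horner evaluation of the letter string (objective: alternative).

-- ===== PORT A =====
def cell_to_coords (cell : String) : Int × Int :=
  -- for char in cell: classify into col/row strings
  let p := cell.toList.foldl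
    (fun (p : List Char × List Char) c =>
      if PySem.Chars.isdigit c then (p.1, p.2 ++ [c]) else (p.1 ++ [c], p.2))
    ([], [])
  -- col = sum((ord(char.lower()) - ord('a') + 1) * (26 ** i) for i, char in enumerate(reversed(col)))
  let colv : Int :=
    ((PySem.List.enumerate p.1.reverse 0).map
      (fun q => (((PySem.Chars.lowerChar q.2).toNat : Int) - 97 + 1) * 26 ^ q.1.toNat)).sum
  -- int(row); Pre_ guarantees row is nonempty (else Python raises ValueError)
  (colv, (PySem.Int.ofChars? p.2).getD 0)

-- ===== PORT B =====
-- horner(s) = 0 if s empty else horner(s[:-1])*26 + value(s[-1]); recursion written on the reversed list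
def pvHornerRev : List Char → Int
  | [] => 0
  | c :: t => pvHornerRev t * 26 + (((PySem.Chars.lowerChar c).toNat : Int) - 96)

def cell_to_coords_alt (cell : String) : Int × Int :=
  let row := cell.toList.filter PySem.Chars.isdigit
  let letters := cell.toList.filter (fun c => !PySem.Chars.isdigit c)
  (pvHornerRev letters.reverse, (PySem.Int.ofChars? row).getD 0)

-- ===== PRECONDITION & SPEC =====
-- Pre_ excludes exactly the strings with no digit character, on which A (and B) raise ValueError when converting the empty row string to int.
def Pre_cell_to_coords (cell : String) : Prop :=
  cell.toList.any PySem.Chars.isdigit = true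
instance (cell : String) : Decidable (Pre_cell_to_coords cell) := by
  unfold Pre_cell_to_coords; infer_instance

def pvWitness_cell_to_coords : String := "AB12"

def Spec_cell_to_coords (cell : String) (out : Int × Int) : Prop := out = cell_to_coords_alt cell
instance (cell : String) (out : Int × Int) : Decidable (Spec_cell_to_coords cell out) := by
  unfold Spec_cell_to_coords; infer_instance

-- ===== CLAIM (what is proved, stated in full; the proofs are below) =====
def Claim_equal_cell_to_coords : Prop := ∀ (cell : String), Dom_cell_to_coords cell → Pre_cell_to_coords cell → Spec_cell_to_coords cell (cell_to_coords cell)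

-- ===== LEMMAS AND PROOFS =====

-- A's fold appends the classified characters to the running accumulators
theorem pvFoldA_eq (cs : List Char) (ca ra : List Char) :
    cs.foldl (fun (p : List Char × List Char) c =>
        if PySem.Chars.isdigit c then (p.1, p.2 ++ [c]) else (p.1 ++ [c], p.2)) (ca, ra)
      = (ca ++ cs.filter (fun c => !PySem.Chars.isdigit c),
         ra ++ cs.filter (fun c => PySem.Chars.isdigit c)) := by
  induction cs generalizing ca ra with
  | nil => simp
  | cons c t ih =>
    by_cases h : PySem.Chars.isdigit c = true <;>
      simp [List.foldl_cons, h, ih]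

-- the enumerate power sum starting at offset k equals Horner times 26^k
theorem pvSum_eq_horner (r : List Char) (k : Nat) :
    ((PySem.List.enumerate r (k : Int)).map
        (fun q => (((PySem.Chars.lowerChar q.2).toNat : Int) - 97 + 1) * 26 ^ q.1.toNat)).sum
      = pvHornerRev r * 26 ^ k := by
  induction r generalizing k with
  | nil => simp [PySem.List.enumerate_nil, pvHornerRev]
  | cons c t ih =>
    have hk : ((k : Int) + 1) = ((k + 1 : Nat) : Int) := by push_cast; ring
    rw [PySem.List.enumerate_cons, List.map_cons, List.sum_cons, hk, ih]
    have : ((k : Int)).toNat = k := by omega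
    rw [this, pvHornerRev]
    ring

-- ===== VERDICT (by name: the statement is the Claim_ definition above) =====
theorem cell_to_coords_spec : Claim_equal_cell_to_coords := by
  intro cell _ _
  unfold Spec_cell_to_coords cell_to_coords cell_to_coords_alt
  rw [pvFoldA_eq]
  have := pvSum_eq_horner (cell.toList.filter (fun c => !PySem.Chars.isdigit c)).reverse 0
  simp at this
  simp [this]
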